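-- pv_equiv track=rewrite | github.com/GardenVarietyAI/rose | src/rose_server/services/keyword_extractor.py | _iter_keyword_phrases
-- ===== SOURCE A (Python) =====
-- def _iter_keyword_phrases(tokens: list[str], stopwords_set: set[str], whitelist: frozenset[str]) -> list[str]:
--     """Extract keyword phrases from tokens."""
--     if not tokens:
--         return []
--
--     phrases: list[str] = []
--     phrase_tokens: list[str] = []
--
--     for token in tokens:
--         if ("." in token or "_" in token or "-" in token) and len(token) >= 3:
--             phrase_tokens.append(token)
--             continue
--
--         if token in whitelist:
--             phrase_tokens.append(token)
--             continue
--
--         if len(token) < 3 or token in stopwords_set: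
--             if phrase_tokens:
--                 phrases.append(" ".join(phrase_tokens))
--                 phrase_tokens = []
--             continue
--
--         phrase_tokens.append(token)
--
--     if phrase_tokens:
--         phrases.append(" ".join(phrase_tokens))
--
--     return phrases
-- ===== SOURCE B (Python) =====
-- def _iter_keyword_phrases(tokens: list[str], stopwords_set: set[str], whitelist: frozenset[str]) -> list[str]:
--     """Extract keyword phrases from tokens."""
--
--     def keep(t: str) -> bool:
--         return (("." in t or "_" in t or "-" in t) and len(t) >= 3) \
--             or t in whitelist \
--             or (len(t) >= 3 and t not in stopwords_set)
--
--     bounds = [-1] + [i for i, t in enumerate(tokens) if not keep(t)] + [len(tokens)]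
--     return [
--         " ".join(tokens[l + 1 : r])
--         for l, r in zip(bounds, bounds[1:])
--         if r - l > 1
--     ]
-- ===== Notes on version B (the rewrite author's own statement) =====
-- stated objective: alternative
-- what changed: Instead of streaming with a phrase accumulator and flush logic, B computes the list of separator indices in one pass, forms boundary pairs with zip, and produces each phrase by slicing tokens between consecutive separators.
import Mathlib
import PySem

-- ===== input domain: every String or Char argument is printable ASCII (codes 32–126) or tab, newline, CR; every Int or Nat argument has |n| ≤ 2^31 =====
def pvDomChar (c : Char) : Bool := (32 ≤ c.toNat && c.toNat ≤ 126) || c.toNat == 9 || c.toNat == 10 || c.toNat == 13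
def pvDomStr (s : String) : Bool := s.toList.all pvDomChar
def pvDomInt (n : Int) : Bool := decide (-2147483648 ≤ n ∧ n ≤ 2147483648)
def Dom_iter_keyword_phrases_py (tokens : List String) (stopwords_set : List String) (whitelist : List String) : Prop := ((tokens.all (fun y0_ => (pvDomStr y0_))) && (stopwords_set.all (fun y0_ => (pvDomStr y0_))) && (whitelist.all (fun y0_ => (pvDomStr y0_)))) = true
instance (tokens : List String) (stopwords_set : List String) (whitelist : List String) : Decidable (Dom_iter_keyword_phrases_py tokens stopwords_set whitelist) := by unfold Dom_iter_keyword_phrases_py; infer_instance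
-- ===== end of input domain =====

-- B replaces A's streaming accumulator/flush loop by a staged computation: it collects
-- the separator positions, pairs consecutive boundaries with zip, and slices each
-- phrase out of tokens (objective: alternative decomposition, same O(n) cost).

-- ===== PORT A =====
-- the for-loop: state (phrases, phrase_tokens), branches in A's order
def pvALoop (stopwords_set whitelist : List String) :
    List String → List String → List String → List String × List String
  | phrases, phrase_tokens, [] => (phrases, phrase_tokens)
  | phrases, phrase_tokens, token :: rest =>
    if (PySem.Str.isIn "." token || PySem.Str.isIn "_" token || PySem.Str.isIn "-" token)
        && decide (3 ≤ PySem.Str.len token) then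
      pvALoop stopwords_set whitelist phrases (phrase_tokens ++ [token]) rest
    else if PySem.Set.contains whitelist token then
      pvALoop stopwords_set whitelist phrases (phrase_tokens ++ [token]) rest
    else if decide (PySem.Str.len token < 3) || PySem.Set.contains stopwords_set token then
      if phrase_tokens ≠ [] then
        pvALoop stopwords_set whitelist (phrases ++ [PySem.Str.join " " phrase_tokens]) [] rest
      else
        pvALoop stopwords_set whitelist phrases phrase_tokens rest
    else
      pvALoop stopwords_set whitelist phrases (phrase_tokens ++ [token]) rest

def iter_keyword_phrases_py (tokens : List String) (stopwords_set : List String) (whitelist : List String) : List String :=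
  if tokens = [] then []
  else
    let r := pvALoop stopwords_set whitelist [] [] tokens
    if r.2 ≠ [] then r.1 ++ [PySem.Str.join " " r.2] else r.1

-- ===== PORT B =====
-- the per-token predicate keep
def pvKeep (stopwords_set whitelist : List String) (t : String) : Bool :=
  ((PySem.Str.isIn "." t || PySem.Str.isIn "_" t || PySem.Str.isIn "-" t)
      && decide (3 ≤ PySem.Str.len t))
  || PySem.Set.contains whitelist t
  || (decide (3 ≤ PySem.Str.len t) && !PySem.Set.contains stopwords_set t)

-- bounds = [-1] + [i for i, t in enumerate(tokens) if not keep(t)] + [len(tokens)]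
def pvBounds (stopwords_set whitelist : List String) (tokens : List String) : List Int :=
  -1 :: ((PySem.List.enumerate tokens 0).filter
          (fun p => !pvKeep stopwords_set whitelist p.2)).map Prod.fst
     ++ [(tokens.length : Int)]

def iter_keyword_phrases_py_alt (tokens : List String) (stopwords_set : List String) (whitelist : List String) : List String :=
  let bounds := pvBounds stopwords_set whitelist tokens
  ((bounds.zip bounds.tail).filter (fun p => decide (1 < p.2 - p.1))).map
    (fun p => PySem.Str.join " " (PySem.List.slice tokens (some (p.1 + 1)) (some p.2)))

-- ===== PRECONDITION & SPEC =====
def Spec_iter_keyword_phrases_py (tokens : List String) (stopwords_set : List String) (whitelist : List String) (out : List String) : Prop := out = iter_keyword_phrases_py_alt tokens stopwords_set whitelist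
instance (tokens : List String) (stopwords_set : List String) (whitelist : List String) (out : List String) : Decidable (Spec_iter_keyword_phrases_py tokens stopwords_set whitelist out) := by unfold Spec_iter_keyword_phrases_py; infer_instance

-- ===== CLAIM (what is proved, stated in full; the proofs are below) =====
def Claim_equal_iter_keyword_phrases_py : Prop := ∀ (tokens : List String) (stopwords_set : List String) (whitelist : List String), Dom_iter_keyword_phrases_py tokens stopwords_set whitelist → Spec_iter_keyword_phrases_py tokens stopwords_set whitelist (iter_keyword_phrases_py tokens stopwords_set whitelist)

-- ===== LEMMAS AND PROOFS =====

-- proof-side bridge: the grouping characterisation of both programs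
def pvGroups (stopwords_set whitelist : List String) : List String → List String
  | [] => []
  | t :: rest =>
    if pvKeep stopwords_set whitelist t then
      PySem.Str.join " " (t :: rest.takeWhile (pvKeep stopwords_set whitelist)) ::
        pvGroups stopwords_set whitelist (rest.dropWhile (pvKeep stopwords_set whitelist))
    else
      pvGroups stopwords_set whitelist rest
  termination_by ts => ts.length
  decreasing_by
  · simp; exact List.length_dropWhile_le _ _
  · simp

-- "len < 3 or stopword" is the negation of the last disjunct of keep
theorem pvSepCond (sw : List String) (t : String) :
    (decide (PySem.Str.len t < 3) || PySem.Set.contains sw t) =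
      !(decide (3 ≤ PySem.Str.len t) && !PySem.Set.contains sw t) := by
  cases hc : PySem.Set.contains sw t <;> cases hl : decide (3 ≤ PySem.Str.len t) <;>
    cases hl2 : decide (PySem.Str.len t < 3) <;> (simp_all; try omega)

-- A's step on a kept token appends it to the pending phrase
theorem pvALoop_step_keep (sw wl : List String) (phrases acc : List String) (t : String)
    (rest : List String) (h : pvKeep sw wl t = true) :
    pvALoop sw wl phrases acc (t :: rest) = pvALoop sw wl phrases (acc ++ [t]) rest := by
  simp only [pvALoop]
  split_ifs with h1 h2 h3 h4 <;>
    first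
      | rfl
      | (exfalso
         simp only [pvKeep] at h
         rw [Bool.not_eq_true] at h1 h2
         rw [h1, h2, Bool.false_or, Bool.false_or] at h
         rw [pvSepCond sw t, h] at h3
         simp at h3)

-- A's step on a separator token flushes the pending phrase (if any)
theorem pvALoop_step_sep (sw wl : List String) (phrases acc : List String) (t : String)
    (rest : List String) (h : pvKeep sw wl t = false) :
    pvALoop sw wl phrases acc (t :: rest) =
      pvALoop sw wl (if acc = [] then phrases else phrases ++ [PySem.Str.join " " acc]) [] rest := by
  simp only [pvKeep, Bool.or_eq_false_iff] at h
  obtain ⟨⟨h1, h2⟩, h3⟩ := h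
  simp only [pvALoop, h1, h2, Bool.false_eq_true, if_false, pvSepCond sw t, h3,
    Bool.not_false, if_true]
  rcases acc with _ | ⟨a, as⟩ <;> simp

-- running A's loop + final flush from state (phrases, acc) yields phrases ++ the groups
theorem pvALoop_eq_groups (sw wl : List String) : ∀ (ts phrases acc : List String),
    (let r := pvALoop sw wl phrases acc ts
     if r.2 ≠ [] then r.1 ++ [PySem.Str.join " " r.2] else r.1) =
    phrases ++ (if acc = [] then pvGroups sw wl ts
                else PySem.Str.join " " (acc ++ ts.takeWhile (pvKeep sw wl)) ::
                       pvGroups sw wl (ts.dropWhile (pvKeep sw wl)))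
  | [], phrases, acc => by
    cases acc <;> simp [pvALoop, pvGroups]
  | t :: rest, phrases, acc => by
    by_cases h : pvKeep sw wl t = true
    · rw [pvALoop_step_keep sw wl phrases acc t rest h]
      rw [pvALoop_eq_groups sw wl rest phrases (acc ++ [t])]
      cases acc <;> simp [pvGroups, h]
    · rw [pvALoop_step_sep sw wl phrases acc t rest (by simpa using h)]
      rw [pvALoop_eq_groups sw wl rest (if acc = [] then phrases else phrases ++ [PySem.Str.join " " acc]) []]
      rcases acc with _ | ⟨a, as⟩ <;> simp [pvGroups, h]
  termination_by ts => ts.length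

-- separator indices of ts, enumeration starting at s
def pvSep (sw wl : List String) (ts : List String) (s : Int) : List Int :=
  ((PySem.List.enumerate ts s).filter (fun p => !pvKeep sw wl p.2)).map Prod.fst

theorem pvBounds_eq (sw wl ts : List String) :
    pvBounds sw wl ts = -1 :: pvSep sw wl ts 0 ++ [(ts.length : Int)] := rfl

theorem pvSep_eq (sw wl ts : List String) (s : Int) :
    pvSep sw wl ts s =
      (ts.zipIdx.filter (fun p => !pvKeep sw wl p.1)).map (fun p => s + (p.2 : Int)) := by
  simp [pvSep, PySem.List.enumerate_eq_zipIdx_map, List.filter_map, List.map_map, Function.comp_def]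

theorem pvSep_shift (sw wl : List String) (ts : List String) (s : Int) :
    pvSep sw wl ts s = (pvSep sw wl ts 0).map (· + s) := by
  rw [pvSep_eq, pvSep_eq, List.map_map]
  congr 1
  funext p
  simp
  omega

theorem pvSep_nonneg (sw wl ts : List String) {i : Int} (h : i ∈ pvSep sw wl ts 0) : 0 ≤ i := by
  rw [pvSep_eq] at h
  simp only [List.mem_map] at h
  obtain ⟨p, _, rfl⟩ := h
  simp

theorem pvSep_all_keep (sw wl : List String) {ts : List String}
    (h : ∀ x ∈ ts, pvKeep sw wl x = true) (s : Int) : pvSep sw wl ts s = [] := by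
  simp only [pvSep, List.map_eq_nil_iff, List.filter_eq_nil_iff]
  intro p hp
  rw [PySem.List.mem_enumerate_iff] at hp
  obtain ⟨k, hk, rfl⟩ := hp
  simp [h _ (ts.getElem_mem hk)]

-- dropping an all-kept prefix shifts the enumeration start
theorem pvSep_append_keep (sw wl : List String) {run : List String} (l : List String) (s : Int)
    (hrun : ∀ x ∈ run, pvKeep sw wl x = true) :
    pvSep sw wl (run ++ l) s = pvSep sw wl l (s + run.length) := by
  unfold pvSep
  rw [PySem.List.enumerate_append, List.filter_append, List.map_append,
    show ((PySem.List.enumerate run s).filter (fun p => !pvKeep sw wl p.2)) = [] from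
      List.map_eq_nil_iff.mp (pvSep_all_keep sw wl hrun s)]
  simp only [List.map_nil, List.nil_append]

theorem pvSep_cons_sep (sw wl : List String) {s0 : String} (l : List String) (s : Int)
    (hs0 : pvKeep sw wl s0 = false) :
    pvSep sw wl (s0 :: l) s = s :: pvSep sw wl l (s + 1) := by
  unfold pvSep
  rw [PySem.List.enumerate_cons, List.filter_cons]
  simp [hs0]

-- separator split: ts = run ++ s0 :: rest with run all-kept and s0 a separator
theorem pvSep_split (sw wl : List String) {run rest : List String} {s0 : String}
    (hrun : ∀ x ∈ run, pvKeep sw wl x = true) (hs0 : pvKeep sw wl s0 = false) :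
    pvSep sw wl (run ++ s0 :: rest) 0 =
      (run.length : Int) :: (pvSep sw wl rest 0).map (· + ((run.length : Int) + 1)) := by
  rw [pvSep_append_keep sw wl _ 0 hrun, pvSep_cons_sep sw wl rest _ hs0,
    pvSep_shift sw wl rest (0 + (run.length : Int) + 1)]
  norm_num

-- shifting a slice past a prefix
theorem pvSlice_shift (pre rest : List String) {i j : Int} (hi : 0 ≤ i) (hj : 0 ≤ j) :
    PySem.List.slice (pre ++ rest) (some ((pre.length : Int) + i)) (some ((pre.length : Int) + j))
      = PySem.List.slice rest (some i) (some j) := by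
  rw [PySem.List.slice_toNat _ (by omega) (by omega), PySem.List.slice_toNat _ hi hj]
  rw [show ((pre.length : Int) + j).toNat = pre.length + j.toNat by omega,
      show ((pre.length : Int) + i).toNat = pre.length + i.toNat by omega,
      show pre.length + j.toNat - (pre.length + i.toNat) = j.toNat - i.toNat by omega,
      List.drop_length_add_append]

-- B computes the groups
theorem pvAlt_eq_groups (sw wl : List String) (ts : List String) :
    iter_keyword_phrases_py_alt ts sw wl = pvGroups sw wl ts := by
  induction hn : ts.length using Nat.strong_induction_on generalizing ts with
  | _ n ih =>
  cases h : ts.dropWhile (pvKeep sw wl) with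
  | nil =>
    have hkeep : ∀ x ∈ ts, pvKeep sw wl x = true := List.dropWhile_eq_nil_iff.mp h
    simp only [iter_keyword_phrases_py_alt, pvBounds_eq, pvSep_all_keep sw wl hkeep 0]
    cases ts with
    | nil => simp [pvGroups]
    | cons t ts' =>
      have hk : pvKeep sw wl t = true := hkeep t (by simp)
      have h' : ts'.dropWhile (pvKeep sw wl) = [] :=
        List.dropWhile_eq_nil_iff.mpr (fun x hx => hkeep x (by simp [hx]))
      have h'' : ts'.takeWhile (pvKeep sw wl) = ts' := by
        have := List.takeWhile_append_dropWhile (p := pvKeep sw wl) (l := ts')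
        rw [h', List.append_nil] at this; exact this
      simp only [List.singleton_append, List.tail_cons, List.zip_cons_cons,
        List.zip_nil_right, List.filter_cons, List.filter_nil]
      rw [pvGroups]
      simp only [hk, if_true, h', h'', pvGroups]
      rw [show (decide (1 < ((t :: ts').length : Int) - (-1))) = true by simp]
      simp only [if_pos trivial, List.map_cons, List.map_nil]
      rw [show (-1 : Int) + 1 = 0 from by norm_num, PySem.List.slice_zero_start,
        PySem.List.slice_to_natCast]
      simp
  | cons s0 rest =>
    have hrun : ∀ x ∈ ts.takeWhile (pvKeep sw wl), pvKeep sw wl x = true :=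
      fun x hx => List.mem_takeWhile_imp hx
    have hs0 : pvKeep sw wl s0 = false := by
      have hne : ts.dropWhile (pvKeep sw wl) ≠ [] := by rw [h]; simp
      have h2 := List.head_dropWhile_not (pvKeep sw wl) hne
      have h4 : (ts.dropWhile (pvKeep sw wl)).head? = some s0 := by rw [h]; rfl
      rw [List.head?_eq_some_head hne] at h4
      rwa [Option.some.inj h4] at h2
    have hts : ts = ts.takeWhile (pvKeep sw wl) ++ s0 :: rest := by
      conv_lhs => rw [← List.takeWhile_append_dropWhile (p := pvKeep sw wl) (l := ts)]
      rw [h]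
    generalize hgen : ts.takeWhile (pvKeep sw wl) = run at hrun hts
    have hlen : rest.length < ts.length := by rw [hts]; simp [List.length_append]; omega
    have hcast : (ts.length : Int) = (rest.length : Int) + ((run.length : Int) + 1) := by
      rw [hts]; push_cast [List.length_append, List.length_cons]; ring
    have hih : iter_keyword_phrases_py_alt rest sw wl = pvGroups sw wl rest :=
      ih rest.length (by rw [← hn]; exact hlen) rest rfl
    have hsep : pvSep sw wl ts 0 =
        (run.length : Int) :: (pvSep sw wl rest 0).map (· + ((run.length : Int) + 1)) := by
      rw [hts]; exact pvSep_split sw wl hrun hs0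
    have hb : pvBounds sw wl ts =
        -1 :: (pvBounds sw wl rest).map (· + ((run.length : Int) + 1)) := by
      rw [pvBounds_eq sw wl ts, pvBounds_eq sw wl rest, hsep, hcast]
      simp only [List.map_cons, List.map_append, List.map_nil, List.cons_append]
      rw [show (-1 : Int) + ((run.length : Int) + 1) = (run.length : Int) by ring]
    have htws : ∀ (l : List String), (∀ x ∈ l, pvKeep sw wl x = true) →
        l.takeWhile (pvKeep sw wl) = l := by
      intro l hl
      have hd : l.dropWhile (pvKeep sw wl) = [] := List.dropWhile_eq_nil_iff.mpr hl
      have h2 := List.takeWhile_append_dropWhile (p := pvKeep sw wl) (l := l)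
      rw [hd, List.append_nil] at h2; exact h2
    have hgs0 : pvGroups sw wl (s0 :: rest) = pvGroups sw wl rest := by
      rw [pvGroups]; simp [hs0]
    have hgrp : pvGroups sw wl ts =
        (if run = [] then [] else [PySem.Str.join " " run]) ++ pvGroups sw wl rest := by
      rcases run with _ | ⟨r, run'⟩
      · rw [hts]
        simpa using hgs0
      · have hkr : pvKeep sw wl r = true := hrun r (by simp)
        have hall : ∀ x ∈ run', pvKeep sw wl x = true := fun x hx => hrun x (by simp [hx])
        have h1 : (run' ++ s0 :: rest).takeWhile (pvKeep sw wl) = run' := by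
          rw [List.takeWhile_append, htws run' hall, if_pos rfl]
          simp [hs0]
        have h2 : (run' ++ s0 :: rest).dropWhile (pvKeep sw wl) = s0 :: rest := by
          rw [List.dropWhile_append, List.dropWhile_eq_nil_iff.mpr hall]
          simp [hs0]
        rw [hts]
        simp only [List.cons_append]
        rw [pvGroups]
        simp only [hkr, if_true, h1, h2, hgs0]
        simp
    have htail :
        List.map (fun p : Int × Int => PySem.Str.join " " (PySem.List.slice ts (some (p.1 + 1)) (some p.2)))
          (List.filter (fun p : Int × Int => decide (1 < p.2 - p.1))
            (List.zip
              ((run.length : Int) :: List.map (· + ((run.length : Int) + 1)) (pvSep sw wl rest 0 ++ [(rest.length : Int)]))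
              (List.map (· + ((run.length : Int) + 1)) (pvSep sw wl rest 0 ++ [(rest.length : Int)])))) =
        pvGroups sw wl rest := by
      have e1 : (run.length : Int) :: List.map (· + ((run.length : Int) + 1)) (pvSep sw wl rest 0 ++ [(rest.length : Int)]) =
          List.map (· + ((run.length : Int) + 1)) (-1 :: (pvSep sw wl rest 0 ++ [(rest.length : Int)])) := by
        simp only [List.map_cons]
        congr 1
        ring
      rw [e1, List.zip_map, List.filter_map, List.map_map]
      rw [← hih]
      simp only [iter_keyword_phrases_py_alt, pvBounds_eq sw wl rest]
      rw [show ((fun p : Int × Int => decide (1 < p.2 - p.1)) ∘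
            Prod.map (· + ((run.length : Int) + 1)) (· + ((run.length : Int) + 1))) =
          (fun p : Int × Int => decide (1 < p.2 - p.1)) from by
        funext p
        rcases p with ⟨a, b⟩
        simp only [Function.comp_apply, Prod.map_apply, decide_eq_decide]
        constructor <;> intro <;> omega]
      apply List.map_congr_left
      rintro ⟨a, b⟩ hp
      obtain ⟨hp1, hp2⟩ := List.of_mem_zip (List.mem_filter.mp hp).1
      have ha : -1 ≤ a := by
        rcases List.mem_cons.mp hp1 with h1 | h1
        · omega
        rcases List.mem_append.mp h1 with h2 | h2
        · have := pvSep_nonneg sw wl rest h2; omega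
        · simp only [List.mem_singleton] at h2; omega
      have hb2 : 0 ≤ b := by
        rcases List.mem_append.mp hp2 with h2 | h2
        · have := pvSep_nonneg sw wl rest h2; omega
        · simp only [List.mem_singleton] at h2; omega
      have hts2 : ts = (run ++ [s0]) ++ rest := by rw [hts, List.append_assoc]; simp
      simp only [Function.comp_apply, Prod.map_apply]
      rw [hts2]
      rw [show a + ((run.length : Int) + 1) + 1 = (((run ++ [s0]).length : Int)) + (a + 1) by
            simp; omega,
          show b + ((run.length : Int) + 1) = (((run ++ [s0]).length : Int)) + b by
            simp; omega,
          pvSlice_shift (run ++ [s0]) rest (by omega) hb2]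
    simp only [iter_keyword_phrases_py_alt, hb, pvBounds_eq sw wl rest, List.cons_append,
      List.tail_cons]
    rw [show List.map (· + ((run.length : Int) + 1)) (-1 :: (pvSep sw wl rest 0 ++ [(rest.length : Int)])) =
          (run.length : Int) :: List.map (· + ((run.length : Int) + 1)) (pvSep sw wl rest 0 ++ [(rest.length : Int)]) from by
        simp only [List.map_cons]; congr 1; ring]
    rw [List.zip_cons_cons, List.filter_cons]
    by_cases hrn : run = []
    · rw [if_neg (by simp [hrn])]
      rw [htail, hgrp, if_pos hrn, List.nil_append]
    · have hpos : 0 < run.length := List.length_pos_iff.mpr hrn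
      rw [if_pos (by simp; omega)]
      rw [List.map_cons, htail, hgrp, if_neg hrn]
      rw [show (-1 : Int) + 1 = 0 from by ring, PySem.List.slice_zero_start,
        PySem.List.slice_to_natCast, hts, List.take_left]
      simp

-- ===== VERDICT (by name: the statement is the Claim_ definition above) =====
theorem iter_keyword_phrases_py_spec : Claim_equal_iter_keyword_phrases_py := by
  intro tokens sw wl _
  unfold Spec_iter_keyword_phrases_py
  rw [pvAlt_eq_groups sw wl tokens]
  unfold iter_keyword_phrases_py
  rcases tokens with _ | ⟨t, ts⟩
  · simp [pvGroups]
  · simpa using pvALoop_eq_groups sw wl (t :: ts) [] []
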